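-- pv_equiv track=rewrite | github.com/yuqrecord/latex-style | generate.py | nest_optional_args
-- ===== SOURCE A (Python) =====
-- LATEX_MAX_ARGS = 9
--
-- def nest_optional_args(c: str, n: int, i: int = 1):
--     """
--     nest_optional_args(c='a', n=3)で文字列{\IfValueT{#1}{#1} {\IfValueT{#2}{#2} {\IfValueT{#3}{#3} {\Phi}}}} を生成する。
--     """
--     if not (0 <= n <= LATEX_MAX_ARGS):
--         raise ValueError(f"n must be between 0 and {LATEX_MAX_ARGS}")
--     if not (1 <= i <= n):
--         raise ValueError(f"i must be between 1 and n")
--     if i == n: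
--         return "{\\IfValueT{"+f"#{i}"+"}{"+f"#{i}"+"} "+"{"+f"{c}"+"}}"
--     else:
--         return "{\\IfValueT{"+f"#{i}"+"}{"+f"#{i}"+"} " + nest_optional_args(c, n, i=i+1) + "}"
-- ===== SOURCE B (Python) =====
-- LATEX_MAX_ARGS = 9
--
-- def nest_optional_args(c: str, n: int, i: int = 1):
--     """Iterative inside-out construction of the nested IfValueT string."""
--     if not (0 <= n <= LATEX_MAX_ARGS):
--         raise ValueError(f"n must be between 0 and {LATEX_MAX_ARGS}")
--     if not (1 <= i <= n):
--         raise ValueError(f"i must be between 1 and n")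
--     inner = "{" + c + "}"
--     for j in range(n, i - 1, -1):
--         inner = "{\\IfValueT{#" + str(j) + "}{#" + str(j) + "} " + inner + "}"
--     return inner
-- ===== Notes on version B (the rewrite author's own statement) =====
-- stated objective: alternative
-- what changed: Replaces A's recursion (which re-validates bounds at every level and nests outside-in) with a single inside-out accumulation loop: start from '{c}' and wrap once per j from n down to i.
import Mathlib
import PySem

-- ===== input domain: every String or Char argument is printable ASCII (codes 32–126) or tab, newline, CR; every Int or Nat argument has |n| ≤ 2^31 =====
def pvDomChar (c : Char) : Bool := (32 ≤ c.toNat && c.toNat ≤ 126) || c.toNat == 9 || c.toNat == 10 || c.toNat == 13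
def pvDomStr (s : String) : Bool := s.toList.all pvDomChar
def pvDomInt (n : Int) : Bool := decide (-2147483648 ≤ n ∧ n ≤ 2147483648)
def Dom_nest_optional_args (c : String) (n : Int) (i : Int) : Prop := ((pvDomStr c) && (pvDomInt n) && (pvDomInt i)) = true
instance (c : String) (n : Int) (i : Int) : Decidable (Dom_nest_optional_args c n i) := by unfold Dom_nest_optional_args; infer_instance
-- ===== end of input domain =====

-- B replaces A's recursion with an inside-out accumulation loop; same strings, same ValueErrors (excluded by Pre_).

-- ===== PORT A =====
-- A recurses with i increasing to n; fuel = 10 bounds the depth (n ≤ 9 inside Pre_, so depth n-i+1 ≤ 9 < 10).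
-- The two bound checks are re-evaluated at each level, exactly as in the Python; on the raising branches
-- (excluded by Pre_) the port returns "".
def nestA (c : String) (n : Int) : Nat → Int → String
  | 0, _ => ""
  | Nat.succ f, i =>
    if ¬ (0 ≤ n ∧ n ≤ 9) then ""
    else if ¬ (1 ≤ i ∧ i ≤ n) then ""
    else if i = n then
      "{\\IfValueT{" ++ ("#" ++ PySem.Int.toStr i) ++ "}{" ++ ("#" ++ PySem.Int.toStr i) ++ "} " ++ "{" ++ c ++ "}}"
    else
      "{\\IfValueT{" ++ ("#" ++ PySem.Int.toStr i) ++ "}{" ++ ("#" ++ PySem.Int.toStr i) ++ "} " ++ nestA c n f (i + 1) ++ "}"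

def nest_optional_args (c : String) (n : Int) (i : Int) : String := nestA c n 10 i

-- ===== PORT B =====
def nest_optional_args_alt (c : String) (n : Int) (i : Int) : String :=
  if ¬ (0 ≤ n ∧ n ≤ 9) then ""
  else if ¬ (1 ≤ i ∧ i ≤ n) then ""
  else
    (PySem.List.pyRange n (i - 1) (-1)).foldl
      (fun inner j => "{\\IfValueT{#" ++ PySem.Int.toStr j ++ "}{#" ++ PySem.Int.toStr j ++ "} " ++ inner ++ "}")
      ("{" ++ c ++ "}")

-- ===== PRECONDITION & SPEC =====
-- Exactly the inputs on which the Python A returns (both ValueError checks pass).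
def Pre_nest_optional_args (c : String) (n : Int) (i : Int) : Prop :=
  (0 ≤ n ∧ n ≤ 9) ∧ (1 ≤ i ∧ i ≤ n)
instance (c : String) (n : Int) (i : Int) : Decidable (Pre_nest_optional_args c n i) := by
  unfold Pre_nest_optional_args; infer_instance

def pvWitness_nest_optional_args : String × Int × Int := ("a", 3, 1)

def Spec_nest_optional_args (c : String) (n : Int) (i : Int) (out : String) : Prop := out = nest_optional_args_alt c n i
instance (c : String) (n : Int) (i : Int) (out : String) : Decidable (Spec_nest_optional_args c n i out) := by unfold Spec_nest_optional_args; infer_instance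

-- ===== CLAIM (what is proved, stated in full; the proofs are below) =====
def Claim_equal_nest_optional_args : Prop := ∀ (c : String) (n : Int) (i : Int), Dom_nest_optional_args c n i → Pre_nest_optional_args c n i → Spec_nest_optional_args c n i (nest_optional_args c n i)

-- ===== LEMMAS AND PROOFS =====

-- range(n, i-1, -1) splits off its last element i when i ≤ n
theorem pyRange_split_last (n i : Int) (h : i ≤ n) :
    PySem.List.pyRange n (i - 1) (-1) = PySem.List.pyRange n i (-1) ++ [i] := by
  rw [PySem.List.pyRange_neg_one, PySem.List.pyRange_neg_one]
  have h1 : (n - (i - 1)).toNat = (n - i).toNat + 1 := by omega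
  rw [h1, List.range_succ, List.map_append]
  simp
  omega

theorem nestA_eq_foldl (c : String) (n : Int) (i : Int) (f : Nat)
    (hn : 0 ≤ n ∧ n ≤ 9) (hi : 1 ≤ i ∧ i ≤ n) (hf : (n - i).toNat < f) :
    nestA c n f i =
      (PySem.List.pyRange n (i - 1) (-1)).foldl
        (fun inner j => "{\\IfValueT{#" ++ PySem.Int.toStr j ++ "}{#" ++ PySem.Int.toStr j ++ "} " ++ inner ++ "}")
        ("{" ++ c ++ "}") := by
  induction f generalizing i with
  | zero => omega
  | succ f ih =>
    rw [nestA, if_neg (by simp [hn]), if_neg (by simp [hi]),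
        pyRange_split_last n i hi.2, List.foldl_append]
    by_cases heq : i = n
    · subst heq
      rw [if_pos rfl, PySem.List.pyRange_neg_one_eq_nil (le_refl _)]
      apply String.ext; simp
    · rw [if_neg heq]
      have hrec : PySem.List.pyRange n i (-1) = PySem.List.pyRange n ((i + 1) - 1) (-1) := by
        norm_num
      rw [hrec, ← ih (i + 1) (by omega) (by omega)]
      apply String.ext; simp

-- ===== VERDICT (by name: the statement is the Claim_ definition above) =====
theorem nest_optional_args_spec : Claim_equal_nest_optional_args := by
  intro c n i _ hpre
  obtain ⟨hn, hi⟩ := hpre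
  unfold Spec_nest_optional_args nest_optional_args nest_optional_args_alt
  rw [if_neg (by simp [hn]), if_neg (by simp [hi])]
  exact nestA_eq_foldl c n i 10 hn hi (by omega)
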